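-- pv_equiv track=rewrite | github.com/0xStryK3R/Scaler-DSA-Revision | python/Day-11/CW_3.py | solve
-- ===== SOURCE A (Python) =====
-- def solve(A):
--     res = []
--     for i in range(A):
--         row = [0]*A
--         for j in range(1, i+2):
--             row[j-1] = j
--         res.append(row[::-1])
--
--     return res
-- ===== SOURCE B (Python) =====
-- def solve(A):
--     # Closed form: cell (i, j) is A - j on/right of the anti-diagonal (i + j >= A - 1), else 0.
--     return [[A - j if i + j >= A - 1 else 0 for j in range(A)] for i in range(A)]
-- ===== Notes on version B (the rewrite author's own statement) =====
-- stated objective: simpler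
-- what changed: Replaces the mutate-a-zero-row ascending fill plus row reversal with a direct closed form: cell (i,j) = A-j when i+j >= A-1 else 0, built by a nested comprehension.
import Mathlib
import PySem

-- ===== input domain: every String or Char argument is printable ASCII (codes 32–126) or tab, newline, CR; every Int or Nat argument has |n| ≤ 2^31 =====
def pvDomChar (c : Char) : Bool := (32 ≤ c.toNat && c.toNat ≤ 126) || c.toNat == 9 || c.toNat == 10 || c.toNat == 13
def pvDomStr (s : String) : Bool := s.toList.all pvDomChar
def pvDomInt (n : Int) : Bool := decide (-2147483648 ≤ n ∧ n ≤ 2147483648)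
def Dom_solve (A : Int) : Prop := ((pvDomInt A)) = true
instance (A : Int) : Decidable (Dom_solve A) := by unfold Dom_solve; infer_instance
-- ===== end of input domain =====

-- B replaces A's ascending index-fill of a zero row followed by a reversal with a
-- closed-form per-cell formula (objective: simpler).

-- ===== PORT A =====
-- row[::-1] ported as .reverse (exact: PySem.List.slice?_none_none_neg_one)
def solve (A : Int) : List (List Int) :=
  (PySem.List.pyRange 0 A 1).foldl
    (fun res i =>
      let row := List.replicate A.toNat 0        -- [0]*A ([] for A ≤ 0, as in Python)
      let row := (PySem.List.pyRange 1 (i + 2) 1).foldl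
        (fun r j => PySem.List.pySetD r (j - 1) j) row
      res ++ [row.reverse])
    []

-- ===== PORT B =====
def solve_alt (A : Int) : List (List Int) :=
  (PySem.List.pyRange 0 A 1).map (fun i =>
    (PySem.List.pyRange 0 A 1).map (fun j =>
      if i + j ≥ A - 1 then A - j else 0))

-- ===== PRECONDITION & SPEC =====
def Spec_solve (A : Int) (out : List (List Int)) : Prop := out = solve_alt A
instance (A : Int) (out : List (List Int)) : Decidable (Spec_solve A out) := by unfold Spec_solve; infer_instance

-- ===== CLAIM (what is proved, stated in full; the proofs are below) =====
def Claim_equal_solve : Prop := ∀ (A : Int), Dom_solve A → Spec_solve A (solve A)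

-- ===== LEMMAS AND PROOFS =====

-- appending one element per iteration is mapping
theorem pv_foldl_append {α β : Type} (l : List α) (h : α → List β) (init : List (List β)) :
    l.foldl (fun res i => res ++ [h i]) init = init ++ l.map h := by
  induction l generalizing init with
  | nil => simp
  | cons x xs ih => simp [List.foldl_cons, ih]

-- the inner fill loop: after writing 1..t into positions 0..t-1 of a zero row of length n
theorem pv_fill (n t : Nat) :
    (PySem.List.pyRange 1 ((t : Int) + 1) 1).foldl
        (fun r j => PySem.List.pySetD r (j - 1) j) (List.replicate n 0)
      = (List.range n).map (fun m => if m < t then (m : Int) + 1 else 0) := by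
  induction t with
  | zero =>
    rw [PySem.List.pyRange_one_eq_nil (by omega)]
    simp [List.map_const']
  | succ t ih =>
    have hsplit : PySem.List.pyRange 1 ((t : Int) + 1 + 1) 1
        = PySem.List.pyRange 1 ((t : Int) + 1) 1 ++ [(t : Int) + 1] :=
      PySem.List.pyRange_one_succ_right (by omega)
    push_cast
    rw [hsplit, List.foldl_append]
    rw [ih]
    have hcast : ((t : Int) + 1 - 1) = ((t : Nat) : Int) := by ring
    rw [List.foldl_cons, List.foldl_nil, hcast, PySem.List.pySetD_natCast]
    apply List.ext_getElem (by simp)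
    intro k hk1 hk2
    simp only [List.getElem_set, List.getElem_map, List.getElem_range]
    by_cases h : t = k
    · subst h; simp
    · simp only [if_neg h]
      by_cases h2 : k < t
      · rw [if_pos h2, if_pos (by omega)]
      · rw [if_neg h2, if_neg (by omega)]

-- reversing the filled row gives B's closed-form row (for a row index i < n)
theorem pv_row (n i : Nat) :
    ((List.range n).map (fun m => if m < i + 1 then (m : Int) + 1 else 0)).reverse
      = (List.range n).map (fun (k : Nat) =>
          if (i : Int) + (k : Int) ≥ (n : Int) - 1
          then (n : Int) - (k : Int) else 0) := by
  apply List.ext_getElem (by simp)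
  intro k hk1 hk2
  have hk : k < n := by simpa using hk2
  rw [List.getElem_reverse]
  simp only [List.getElem_map, List.getElem_range, List.length_map, List.length_range]
  by_cases h : n - 1 - k < i + 1
  · rw [if_pos h, if_pos (show (i : Int) + (k : Int) ≥ (n : Int) - 1 by omega)]
    omega
  · rw [if_neg h, if_neg (show ¬ ((i : Int) + (k : Int) ≥ (n : Int) - 1) by omega)]

theorem solve_eq (A : Int) : solve A = solve_alt A := by
  unfold solve solve_alt
  rw [pv_foldl_append, List.nil_append]
  by_cases hA : 0 ≤ A
  · have hn : ((A.toNat : Int)) = A := Int.toNat_of_nonneg hA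
    rw [← hn, PySem.List.pyRange_one]
    simp only [sub_zero, Int.toNat_natCast, List.map_map, Function.comp_def, zero_add]
    apply List.map_congr_left
    intro it hit
    simp only [List.mem_range] at hit
    have h2 : ((it : Int)) + 2 = (((it + 1 : Nat) : Int)) + 1 := by push_cast; ring
    rw [h2, pv_fill A.toNat (it + 1)]
    have := pv_row A.toNat it
    rw [this]
  · have h1 : PySem.List.pyRange 0 A 1 = [] :=
      PySem.List.pyRange_one_eq_nil (by omega)
    rw [h1]; simp

-- ===== VERDICT (by name: the statement is the Claim_ definition above) =====
theorem solve_spec : Claim_equal_solve := by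
  intro A _
  unfold Spec_solve
  exact solve_eq A
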